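-- pv_equiv track=rewrite | github.com/nermadie/CodeForces_Solutions | CodeforcesRound928Div4/prob06_dp.py | solve
-- ===== SOURCE A (Python) =====
-- def solve(grid, odd):
--     grid_overlapped = [[0] * 7 for _ in range(7)]
--     count = 0
--     for i in range(1, 6):
--         for j in range(1, 6):
--             if (i + j) % 2 == odd:
--                 if (
--                     grid[i][j] == "B"
--                     and grid[i - 1][j - 1] == "B"
--                     and grid[i - 1][j + 1] == "B"
--                     and grid[i + 1][j - 1] == "B"
--                     and grid[i + 1][j + 1] == "B"
--                 ):
--                     t = 1 << count
--                     grid_overlapped[i][j] |= t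
--                     grid_overlapped[i - 1][j - 1] |= t
--                     grid_overlapped[i - 1][j + 1] |= t
--                     grid_overlapped[i + 1][j - 1] |= t
--                     grid_overlapped[i + 1][j + 1] |= t
--                     count += 1
--     moves_set = set()
--     for i in range(7):
--         for j in range(7):
--             if grid_overlapped[i][j] not in moves_set and grid_overlapped[i][j] != 0:
--                 moves_set.add(grid_overlapped[i][j])
--     moves_cover_another_moves = set()
--     for move_i in moves_set:
--         cover_all = True
--         for move_j in moves_set:
--             if move_i == move_j:
--                 continue
--             if move_j & move_i == move_i:
--                 cover_all = False
--                 break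
--         if cover_all:
--             moves_cover_another_moves.add(move_i)
--     dp = [20] * (1 << count)
--     dp[0] = 0
--     for i in range(1 << count):
--         if dp[i] == 20:
--             continue
--         else:
--             for move in moves_cover_another_moves:
--                 state = i | move
--                 dp[state] = min(dp[state], dp[i] + 1)
--
--     return dp[-1]
-- ===== SOURCE B (Python) =====
-- def solve(grid, odd):
--     # Different decomposition: collect the cross CENTERS first, derive each cell's
--     # coverage mask directly from the center list (no 7x7 scratch array), and
--     # replace the bottom-up DP over all 1<<count states by a level-by-level BFS
--     # from state 0 that stops at the first level containing the full mask.
--     centers = [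
--         (i, j)
--         for i in range(1, 6)
--         for j in range(1, 6)
--         if (i + j) % 2 == odd
--         and all(grid[i + di][j + dj] == "B"
--                 for di, dj in ((0, 0), (-1, -1), (-1, 1), (1, -1), (1, 1)))
--     ]
--     count = len(centers)
--
--     def covers(c, i, j):
--         ci, cj = c
--         return (i == ci and j == cj) or (abs(i - ci) == 1 and abs(j - cj) == 1)
--
--     masks = set()
--     for i in range(7):
--         for j in range(7):
--             m = 0
--             for k, c in enumerate(centers):
--                 if covers(c, i, j):
--                     m |= 1 << k
--             if m:
--                 masks.add(m)
--
--     moves = [m for m in masks if not any(m != n and n & m == m for n in masks)]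
--
--     full = (1 << count) - 1
--     frontier = {0}
--     seen = {0}
--     for d in range(20):
--         if full in seen:
--             return d
--         frontier = {s | m for s in frontier for m in moves if (s | m) not in seen}
--         seen |= frontier
--     return 20
-- ===== Notes on version B (the rewrite author's own statement) =====
-- stated objective: alternative
-- what changed: B decomposes the preprocessing differently (it collects the cross centers as a list and derives each cell's coverage bitmask directly from the center list instead of OR-updating a 7x7 scratch array) and replaces the bottom-up DP over all 1<<count subset states by a level-by-level BFS from state 0 that visits only reachable states and stops at the first level containing the full mask.
import Mathlib
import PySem

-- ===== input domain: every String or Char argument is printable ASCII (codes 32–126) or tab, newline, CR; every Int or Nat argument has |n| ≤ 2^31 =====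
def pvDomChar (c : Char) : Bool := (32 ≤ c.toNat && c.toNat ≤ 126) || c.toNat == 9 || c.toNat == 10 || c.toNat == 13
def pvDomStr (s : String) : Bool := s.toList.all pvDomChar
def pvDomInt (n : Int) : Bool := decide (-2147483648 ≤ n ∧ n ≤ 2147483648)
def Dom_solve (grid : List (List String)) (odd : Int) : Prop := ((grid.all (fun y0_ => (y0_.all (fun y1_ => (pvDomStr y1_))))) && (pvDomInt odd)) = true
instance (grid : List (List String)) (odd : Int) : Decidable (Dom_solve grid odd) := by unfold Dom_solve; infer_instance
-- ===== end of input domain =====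

-- B collects the cross centers as a list, derives each cell's coverage mask directly from the
-- center list (no 7x7 scratch array), and replaces the bottom-up DP over all 1<<count subset
-- states by a level-by-level BFS from state 0 that stops at the first level containing the
-- full mask (an alternative decomposition; same cost).


-- ===== PORT A =====
def pvCell (grid : List (List String)) (i j : Int) : String :=
  (PySem.List.pyGet? ((PySem.List.pyGet? grid i).getD []) j).getD ""

def pvIsCross (grid : List (List String)) (i j : Int) : Bool :=
  pvCell grid i j == "B" && pvCell grid (i-1) (j-1) == "B" && pvCell grid (i-1) (j+1) == "B"
    && pvCell grid (i+1) (j-1) == "B" && pvCell grid (i+1) (j+1) == "B"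

def pvGet2 (g : List (List Int)) (i j : Int) : Int := (g.getD i.toNat []).getD j.toNat 0

def pvOr2 (g : List (List Int)) (i j t : Int) : List (List Int) :=
  g.set i.toNat ((g.getD i.toNat []).set j.toNat (PySem.Int.bor (pvGet2 g i j) t))

def pvBuildCell (grid : List (List String)) (odd : Int) (st : List (List Int) × Nat) (i j : Int) :
    List (List Int) × Nat :=
  if PySem.Int.mod (i + j) 2 == odd then
    if pvIsCross grid i j then
      let t : Int := 1 <<< st.2
      let g := pvOr2 st.1 i j t
      let g := pvOr2 g (i-1) (j-1) t
      let g := pvOr2 g (i-1) (j+1) t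
      let g := pvOr2 g (i+1) (j-1) t
      let g := pvOr2 g (i+1) (j+1) t
      (g, st.2 + 1)
    else st
  else st

def pvBuild (grid : List (List String)) (odd : Int) : List (List Int) × Nat :=
  (PySem.List.pyRange 1 6 1).foldl (fun st i =>
    (PySem.List.pyRange 1 6 1).foldl (fun st j => pvBuildCell grid odd st i j) st)
    (List.replicate 7 (List.replicate 7 0), 0)

def pvMovesSet (g : List (List Int)) : PySem.Set Int :=
  (PySem.List.pyRange 0 7 1).foldl (fun ms i =>
    (PySem.List.pyRange 0 7 1).foldl (fun ms j =>
      if !(PySem.Set.contains ms (pvGet2 g i j)) && pvGet2 g i j != 0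
      then PySem.Set.add ms (pvGet2 g i j) else ms) ms)
    PySem.Set.empty

def pvCoverAll (mi : Int) : List Int → Bool
  | [] => true
  | mj :: rest =>
      if mi == mj then pvCoverAll mi rest
      else if PySem.Int.band mj mi == mi then false
      else pvCoverAll mi rest

def pvMaximal (ms : PySem.Set Int) : PySem.Set Int :=
  ms.foldl (fun mc mi => if pvCoverAll mi ms then PySem.Set.add mc mi else mc) PySem.Set.empty

def pvDpInner (moves : List Int) (k : Nat) (dp : List Int) : List Int :=
  moves.foldl (fun dp m =>
    dp.set (PySem.Int.bor (k : Int) m).toNat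
      (min (dp.getD (PySem.Int.bor (k : Int) m).toNat 0) (dp.getD k 0 + 1))) dp

def pvDpLoop (moves : List Int) (n : Nat) : List Int :=
  (List.range n).foldl (fun dp k => if dp.getD k 0 == 20 then dp else pvDpInner moves k dp)
    ((List.replicate n 20).set 0 0)

def solve (grid : List (List String)) (odd : Int) : Int :=
  let st := pvBuild grid odd
  let moves := pvMaximal (pvMovesSet st.1)
  let dp := pvDpLoop moves (1 <<< st.2)
  (PySem.List.pyGet? dp (-1)).getD 0

-- ===== PORT B =====
def bOffsets : List (Int × Int) := [(0, 0), (-1, -1), (-1, 1), (1, -1), (1, 1)]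

-- the list comprehension collecting the cross centers
def bCenters (grid : List (List String)) (odd : Int) : List (Int × Int) :=
  (PySem.List.pyRange 1 6 1).flatMap (fun i =>
    (PySem.List.pyRange 1 6 1).filterMap (fun j =>
      if PySem.Int.mod (i + j) 2 == odd
          && bOffsets.all (fun d =>
            (PySem.List.pyGet? ((PySem.List.pyGet? grid (i + d.1)).getD []) (j + d.2)).getD "" == "B")
      then some (i, j) else none))

def bCovers (c : Int × Int) (i j : Int) : Bool :=
  (i == c.1 && j == c.2) || ((i - c.1).natAbs == 1 && (j - c.2).natAbs == 1)

-- mask of cell (i,j): bits of the centers whose cross covers it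
def bMask (centers : List (Int × Int)) (i j : Int) : Int :=
  (PySem.List.enumerate centers 0).foldl
    (fun m kc => if bCovers kc.2 i j then PySem.Int.bor m (((1 <<< kc.1.toNat : Nat)) : Int) else m) 0

def bMasks (centers : List (Int × Int)) : PySem.Set Int :=
  (PySem.List.pyRange 0 7 1).foldl (fun ms i =>
    (PySem.List.pyRange 0 7 1).foldl (fun ms j =>
      let m := bMask centers i j
      if m != 0 then PySem.Set.add ms m else ms) ms) PySem.Set.empty

-- one BFS level: all newly reached states
def bBfsStep (moves : List Int) (seen frontier : PySem.Set Int) : PySem.Set Int :=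
  frontier.foldl (fun acc s => moves.foldl (fun acc m =>
    if !(PySem.Set.contains seen (PySem.Int.bor s m))
    then PySem.Set.add acc (PySem.Int.bor s m) else acc) acc) PySem.Set.empty

def bBfsGo (moves : List Int) (full : Int) : Nat → Nat → PySem.Set Int → PySem.Set Int → Int
  | _, 0, _, _ => 20
  | d, fuel+1, frontier, seen =>
    if PySem.Set.contains seen full then (d : Int)
    else
      let fr := bBfsStep moves seen frontier
      bBfsGo moves full (d+1) fuel fr (PySem.Set.union seen fr)

def solve_alt (grid : List (List String)) (odd : Int) : Int :=
  let centers := bCenters grid odd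
  let count := centers.length
  let masks := bMasks centers
  let moves := masks.filter (fun m => !(masks.any (fun n => !(m == n) && (PySem.Int.band n m == m))))
  let full : Int := ((1:Int) <<< count) - 1
  bBfsGo moves full 0 20 (PySem.Set.ofList [0]) (PySem.Set.ofList [0])

-- ===== PRECONDITION & SPEC =====
-- When odd ∈ {0,1}, Pre_ requires the natural board shape (at least 7 rows of length ≥ 7, the
-- problem's 7×7 grid); smaller/ragged grids make A raise IndexError.  A also happens to return on
-- some smaller grids when the short-circuit 'and' never reaches an out-of-range cell; those
-- content-dependent accidents of evaluation order are excluded with the shape condition because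
-- A's exact no-IndexError domain is not a closed-form shape (B behaves identically there).  For
-- odd ∉ {0,1} A never touches the grid and Pre_ accepts everything.
def Pre_solve (grid : List (List String)) (odd : Int) : Prop :=
  odd = 0 ∨ odd = 1 → (7 ≤ grid.length ∧ ∀ row ∈ grid.take 7, 7 ≤ row.length)
instance (grid : List (List String)) (odd : Int) : Decidable (Pre_solve grid odd) := by
  unfold Pre_solve; infer_instance

def pvWitness_solve : List (List String) × Int :=
  ([["B","B","B","B","B","B","B"], ["B","B","B","B","B","B","B"], ["B","B","B","B","B","B","B"],
    ["B","B","B","B","B","B","B"], ["B","B","B","B","B","B","B"], ["B","B","B","B","B","B","B"],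
    ["B","B","B","B","B","B","B"]], 0)

def Spec_solve (grid : List (List String)) (odd : Int) (out : Int) : Prop := out = solve_alt grid odd
instance (grid : List (List String)) (odd : Int) (out : Int) : Decidable (Spec_solve grid odd out) := by
  unfold Spec_solve; infer_instance

-- ===== CLAIM (what is proved, stated in full; the proofs are below) =====
def Claim_equal_solve : Prop := ∀ (grid : List (List String)) (odd : Int), Dom_solve grid odd → Pre_solve grid odd → Spec_solve grid odd (solve grid odd)

-- ===== LEMMAS AND PROOFS =====

-- `Reach moves s d`: state s is obtainable from 0 by OR-ing in d (not necessarily distinct) moves.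
inductive Reach (moves : List Int) : Int → Nat → Prop
  | zero : Reach moves 0 0
  | step {s : Int} {d : Nat} {m : Int} : Reach moves s d → m ∈ moves →
      Reach moves (PySem.Int.bor s m) (d + 1)

-- the common value both programs compute: the 20-capped BFS distance of s from 0
noncomputable def Dd (moves : List Int) (s : Int) : Nat := sInf (insert 20 {d | Reach moves s d})

-- A-side prefix value: dp[s] after the outer DP loop has processed indices 0..k-1
noncomputable def Vk (moves : List Int) : Nat → Int → Nat
  | 0, s => if s = 0 then 0 else 20
  | k+1, s =>
      if ∃ m ∈ moves, PySem.Int.bor (k : Int) m = s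
      then min (Vk moves k s) (min 20 (Dd moves (k : Int) + 1))
      else Vk moves k s

-- ---------- generic helpers ----------
lemma pv_two_pow_cast (c : Nat) : ((2^c : Nat) : Int) = (2:Int)^c := by push_cast; ring

lemma pv_bor_eq (a b : Int) (ha : 0 ≤ a) (hb : 0 ≤ b) :
    PySem.Int.bor a b = ((a.toNat ||| b.toNat : Nat) : Int) := PySem.Int.bor_of_nonneg ha hb

lemma pv_bor_nonneg {a b : Int} (ha : 0 ≤ a) (hb : 0 ≤ b) : 0 ≤ PySem.Int.bor a b := by
  rw [pv_bor_eq a b ha hb]; exact Int.natCast_nonneg _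

lemma pv_bor_lt {a b : Int} {c : Nat} (ha : 0 ≤ a) (hb : 0 ≤ b)
    (h1 : a < (2:Int)^c) (h2 : b < (2:Int)^c) : PySem.Int.bor a b < (2:Int)^c := by
  have hc := pv_two_pow_cast c
  rw [pv_bor_eq a b ha hb, ← hc]
  have h1' : a.toNat < 2^c := by omega
  have h2' : b.toNat < 2^c := by omega
  exact_mod_cast Nat.or_lt_two_pow h1' h2'

lemma pv_le_bor {a b : Int} (ha : 0 ≤ a) (hb : 0 ≤ b) : a ≤ PySem.Int.bor a b := by
  rw [pv_bor_eq a b ha hb]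
  have h : a.toNat ≤ a.toNat ||| b.toNat := Nat.left_le_or
  omega

lemma pv_getD_mem {α : Type} (l : List α) (d : α) (n : Nat) : l.getD n d ∈ l ∨ l.getD n d = d := by
  by_cases h : n < l.length
  · left; rw [List.getD_eq_getElem?_getD, List.getElem?_eq_getElem h]; exact List.getElem_mem h
  · right; rw [List.getD_eq_getElem?_getD, List.getElem?_eq_none (by omega)]; rfl

lemma pv_getD_set_self {α : Type} {l : List α} {i : Nat} {v d : α} (h : i < l.length) :
    (l.set i v).getD i d = v := by
  simp [List.getD_eq_getElem?_getD, h]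

lemma pv_getD_set_ne {α : Type} {l : List α} {i j : Nat} {v d : α} (h : i ≠ j) :
    (l.set i v).getD j d = l.getD j d := by
  simp [List.getD_eq_getElem?_getD, h]

lemma pv_one_shiftLeft_int (c : Nat) : (1:Int) <<< c = (2:Int)^c := by
  rw [Int.shiftLeft_eq]; ring

-- ---------- reachability facts ----------
lemma reach_bounds {count : Nat} {moves : List Int}
    (hm : ∀ m ∈ moves, 0 ≤ m ∧ m < (2:Int)^count) :
    ∀ {s : Int} {d : Nat}, Reach moves s d → 0 ≤ s ∧ s < (2:Int)^count := by
  intro s d h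
  induction h with
  | zero => exact ⟨le_refl 0, by positivity⟩
  | step h hmem ih =>
      obtain ⟨h1, h2⟩ := hm _ hmem
      exact ⟨pv_bor_nonneg ih.1 h1, pv_bor_lt ih.1 h1 ih.2 h2⟩

lemma reach_zero_eq {moves : List Int} {s : Int} (h : Reach moves s 0) : s = 0 := by
  cases h; rfl

lemma reach_congr {l1 l2 : List Int} (h : ∀ x, x ∈ l1 ↔ x ∈ l2) {s : Int} {d : Nat}
    (hr : Reach l1 s d) : Reach l2 s d := by
  induction hr with
  | zero => exact Reach.zero
  | step _ hmem ih => exact ih.step ((h _).mp hmem)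

lemma Dd_congr {l1 l2 : List Int} (h : ∀ x, x ∈ l1 ↔ x ∈ l2) (s : Int) :
    Dd l1 s = Dd l2 s := by
  unfold Dd
  congr 1
  ext d
  simp only [Set.mem_insert_iff, Set.mem_setOf_eq]
  constructor
  · rintro (rfl | hr)
    · exact Or.inl rfl
    · exact Or.inr (reach_congr h hr)
  · rintro (rfl | hr)
    · exact Or.inl rfl
    · exact Or.inr (reach_congr (fun x => (h x).symm) hr)

lemma Dd_le_20 (moves : List Int) (s : Int) : Dd moves s ≤ 20 :=
  Nat.sInf_le (Set.mem_insert _ _)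

lemma Dd_le_of_reach {moves : List Int} {s : Int} {d : Nat} (h : Reach moves s d) :
    Dd moves s ≤ d := Nat.sInf_le (Set.mem_insert_iff.mpr (Or.inr h))

lemma Dd_zero (moves : List Int) : Dd moves 0 = 0 :=
  Nat.le_zero.mp (Dd_le_of_reach Reach.zero)

lemma reach_Dd {moves : List Int} {s : Int} (h : Dd moves s < 20) :
    Reach moves s (Dd moves s) := by
  have hne : (insert 20 {d | Reach moves s d}).Nonempty := ⟨20, Set.mem_insert _ _⟩
  have hmem := Nat.sInf_mem hne
  rcases Set.mem_insert_iff.mp hmem with h20 | hr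
  · exfalso; unfold Dd at h; omega
  · exact hr

lemma Dd_bor_le {moves : List Int} {s m : Int} (hmem : m ∈ moves) :
    Dd moves (PySem.Int.bor s m) ≤ min 20 (Dd moves s + 1) := by
  refine le_min (Dd_le_20 _ _) ?_
  by_cases h : Dd moves s < 20
  · exact Dd_le_of_reach ((reach_Dd h).step hmem)
  · have := Dd_le_20 moves (PySem.Int.bor s m); omega

lemma Dd_ge_of_not_reach {moves : List Int} {s : Int} {d : Nat}
    (h : ∀ e, e < d → ¬ Reach moves s e) (hd : d ≤ 20) : d ≤ Dd moves s := by
  refine le_csInf ⟨20, Set.mem_insert _ _⟩ ?_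
  rintro b hb
  rcases Set.mem_insert_iff.mp hb with rfl | hr
  · exact hd
  · by_contra hlt; exact h b (by omega) hr

lemma Dd_pred {count : Nat} {moves : List Int}
    (hm : ∀ m ∈ moves, 0 ≤ m ∧ m < (2:Int)^count) {s : Int}
    (hs : s ≠ 0) (hlt : Dd moves s < 20) :
    ∃ p m, m ∈ moves ∧ PySem.Int.bor p m = s ∧ 0 ≤ p ∧ p < s ∧ Dd moves p + 1 ≤ Dd moves s := by
  have hr := reach_Dd hlt
  cases e : Dd moves s with
  | zero => rw [e] at hr; exact absurd (reach_zero_eq hr) hs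
  | succ e' =>
      rw [e] at hr
      cases hr with
      | @step p _ m hp hmem =>
          have hb := reach_bounds hm hp
          have hDp : Dd moves p ≤ e' := Dd_le_of_reach hp
          have hple : p ≤ PySem.Int.bor p m := pv_le_bor hb.1 (hm _ hmem).1
          refine ⟨p, m, hmem, rfl, hb.1, ?_, by omega⟩
          rcases lt_or_eq_of_le hple with h | h
          · exact h
          · exfalso; rw [← h] at e; omega

-- ---------- Vk facts ----------
lemma Vk_succ (moves : List Int) (k : Nat) (s : Int) :
    Vk moves (k+1) s = if ∃ m ∈ moves, PySem.Int.bor (k : Int) m = s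
      then min (Vk moves k s) (min 20 (Dd moves (k : Int) + 1))
      else Vk moves k s := rfl

lemma Vk_zero (moves : List Int) : ∀ k, Vk moves k 0 = 0 := by
  intro k; induction k with
  | zero => simp [Vk]
  | succ k ih => unfold Vk; split_ifs <;> simp [ih]

lemma Vk_le_20 (moves : List Int) : ∀ k (s : Int), Vk moves k s ≤ 20 := by
  intro k; induction k with
  | zero => intro s; unfold Vk; split_ifs <;> omega
  | succ k ih =>
      intro s; unfold Vk; split_ifs with h
      · exact le_trans (min_le_left _ _) (ih s)
      · exact ih s

lemma Dd_le_Vk (moves : List Int) : ∀ k (s : Int), Dd moves s ≤ Vk moves k s := by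
  intro k; induction k with
  | zero =>
      intro s; unfold Vk; split_ifs with h
      · subst h; rw [Dd_zero]
      · exact Dd_le_20 _ _
  | succ k ih =>
      intro s; unfold Vk; split_ifs with h
      · obtain ⟨m, hmem, hbor⟩ := h
        refine le_min (ih s) ?_
        calc Dd moves s = Dd moves (PySem.Int.bor (k:Int) m) := by rw [hbor]
          _ ≤ min 20 (Dd moves (k:Int) + 1) := Dd_bor_le hmem
      · exact ih s

lemma Vk_le_edge (moves : List Int) : ∀ (k p : Nat) (s : Int), p < k →
    (∃ m ∈ moves, PySem.Int.bor (p:Int) m = s) →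
    Vk moves k s ≤ min 20 (Dd moves (p:Int) + 1) := by
  intro k; induction k with
  | zero => intro p s h _; exact absurd h (Nat.not_lt_zero p)
  | succ k ih =>
      intro p s hpk hedge
      unfold Vk
      by_cases hpk' : p = k
      · subst hpk'; rw [if_pos hedge]; exact min_le_right _ _
      · have hlt : p < k := by omega
        split_ifs with h
        · exact le_trans (min_le_left _ _) (ih p s hlt hedge)
        · exact ih p s hlt hedge

lemma Vk_stab {count : Nat} {moves : List Int}
    (hm : ∀ m ∈ moves, 0 ≤ m ∧ m < (2:Int)^count) :
    ∀ (k s : Nat), s ≤ k → Vk moves k (s:Int) = Dd moves (s:Int) := by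
  intro k s hsk
  refine le_antisymm ?_ (Dd_le_Vk moves k _)
  by_cases hD : Dd moves (s:Int) < 20
  · by_cases hs0 : s = 0
    · subst hs0; simp [Vk_zero, Dd_zero]
    · obtain ⟨p, m, hmem, hbor, hp0, hps, hDp⟩ :=
        Dd_pred hm (s := (s:Int)) (by exact_mod_cast hs0) hD
      have hpn : p = ((p.toNat : Nat) : Int) := (Int.toNat_of_nonneg hp0).symm
      have hplt : p.toNat < s := by omega
      have hedge : ∃ m' ∈ moves, PySem.Int.bor ((p.toNat : Nat) : Int) m' = (s:Int) :=
        ⟨m, hmem, by rw [← hpn]; exact hbor⟩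
      calc Vk moves k (s:Int) ≤ min 20 (Dd moves ((p.toNat : Nat) : Int) + 1) :=
            Vk_le_edge moves k p.toNat (s:Int) (by omega) hedge
        _ ≤ Dd moves ((p.toNat : Nat) : Int) + 1 := min_le_right _ _
        _ ≤ Dd moves (s:Int) := by rw [← hpn]; exact hDp
  · have h1 := Vk_le_20 moves k (s:Int)
    have h2 := Dd_le_20 moves (s:Int)
    omega

-- ---------- DP side ----------
lemma pv_dp0 (n : Nat) : ∀ s, s < n →
    (((List.replicate n (20:Int)).set 0 0).getD s 0) = if s = 0 then 0 else 20 := by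
  intro s hs
  by_cases h : s = 0
  · subst h
    rw [pv_getD_set_self (by simpa using by omega)]
    simp
  · rw [pv_getD_set_ne (by omega), if_neg h]
    rw [List.getD_eq_getElem?_getD, List.getElem?_replicate]
    simp [hs]

lemma pv_inner_inv {count : Nat} (moves : List Int)
    (hm : ∀ m ∈ moves, 0 ≤ m ∧ m < (2:Int)^count)
    (k : Nat) (hk : k < 2^count) (hDk : Dd moves (k:Int) < 20) :
    ∀ (ml : List Int), (∀ m ∈ ml, 0 ≤ m ∧ m < (2:Int)^count) →
    ∀ (W : Nat → Nat) (dp : List Int),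
      dp.length = 2^count → (∀ s, W s ≤ 20) → W k = Dd moves (k:Int) →
      (∀ s, s < 2^count → dp.getD s 0 = ((W s : Nat) : Int)) →
      (ml.foldl (fun dp m => dp.set (PySem.Int.bor (k:Int) m).toNat
          (min (dp.getD (PySem.Int.bor (k:Int) m).toNat 0) (dp.getD k 0 + 1))) dp).length = 2^count
      ∧ ∀ s, s < 2^count →
        (ml.foldl (fun dp m => dp.set (PySem.Int.bor (k:Int) m).toNat
            (min (dp.getD (PySem.Int.bor (k:Int) m).toNat 0) (dp.getD k 0 + 1))) dp).getD s 0
          = (((if ∃ m ∈ ml, PySem.Int.bor (k:Int) m = (s:Int)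
               then min (W s) (Dd moves (k:Int) + 1) else W s : Nat)) : Int) := by
  intro ml
  induction ml with
  | nil =>
      intro _ W dp hlen hW20 hWk hdp
      refine ⟨hlen, fun s hs => ?_⟩
      simp only [List.foldl_nil]
      rw [hdp s hs]
      simp
  | cons m rest ih =>
      intro hml W dp hlen hW20 hWk hdp
      have hm0 := hml m List.mem_cons_self
      have hbor : PySem.Int.bor (k:Int) m = ((k ||| m.toNat : Nat) : Int) := by
        rw [pv_bor_eq _ _ (by positivity) hm0.1]
        simp
      have hmlt : m.toNat < 2^count := by
        have := pv_two_pow_cast count; omega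
      have hstlt : k ||| m.toNat < 2^count := Nat.or_lt_two_pow hk hmlt
      simp only [List.foldl_cons, hbor, Int.toNat_natCast]
      have hval : min (dp.getD (k ||| m.toNat) 0) (dp.getD k 0 + 1)
          = ((min (W (k ||| m.toNat)) (Dd moves (k:Int) + 1) : Nat) : Int) := by
        rw [hdp _ hstlt, hdp k hk, hWk]; push_cast; rfl
      rw [hval]
      set W1 : Nat → Nat := fun s => if k ||| m.toNat = s then min (W s) (Dd moves (k:Int) + 1) else W s with hW1
      have h1 := ih (fun m' hm' => hml m' (List.mem_cons_of_mem m hm')) W1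
        (dp.set (k ||| m.toNat) ((min (W (k ||| m.toNat)) (Dd moves (k:Int) + 1) : Nat) : Int))
        (by simpa using hlen)
        (by
          intro s; simp only [hW1]; split_ifs with h
          · exact le_trans (min_le_left _ _) (hW20 s)
          · exact hW20 s)
        (by
          simp only [hW1]; split_ifs with h
          · rw [hWk]; exact Nat.min_eq_left (Nat.le_succ _)
          · exact hWk)
        (by
          intro s hs
          by_cases h : k ||| m.toNat = s
          · subst h
            rw [pv_getD_set_self (by omega)]
            simp only [hW1, if_pos rfl]
          · rw [pv_getD_set_ne h, hdp s hs]
            simp only [hW1, if_neg h])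
      refine ⟨h1.1, fun s hs => ?_⟩
      rw [h1.2 s hs]
      congr 1
      simp only [hW1, List.exists_mem_cons_iff, hbor]
      have hcast : (((k ||| m.toNat : Nat) : Int) = (s:Int)) ↔ (k ||| m.toNat = s) := Nat.cast_inj
      by_cases h2 : k ||| m.toNat = s
      · simp only [hcast, h2, if_pos rfl, true_or, if_pos trivial]
        by_cases h1' : ∃ m' ∈ rest, PySem.Int.bor (k:Int) m' = (s:Int)
        · rw [if_pos h1', min_assoc, min_self]
        · rw [if_neg h1']
      · simp [hcast, h2]

lemma pv_dp_inv {count : Nat} (moves : List Int)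
    (hm : ∀ m ∈ moves, 0 ≤ m ∧ m < (2:Int)^count) :
    ∀ k, k ≤ 2^count →
      ((List.range k).foldl
          (fun dp k' => if dp.getD k' 0 == 20 then dp else pvDpInner moves k' dp)
          ((List.replicate (2^count) (20:Int)).set 0 0)).length = 2^count
      ∧ ∀ s, s < 2^count →
        ((List.range k).foldl
            (fun dp k' => if dp.getD k' 0 == 20 then dp else pvDpInner moves k' dp)
            ((List.replicate (2^count) (20:Int)).set 0 0)).getD s 0
          = ((Vk moves k (s:Int) : Nat) : Int) := by
  intro k; induction k with
  | zero =>
      intro _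
      refine ⟨by simp, fun s hs => ?_⟩
      simp only [List.range_zero, List.foldl_nil]
      rw [pv_dp0 (2^count) s hs]
      unfold Vk
      by_cases h : s = 0
      · simp [h]
      · rw [if_neg h, if_neg (by exact_mod_cast h)]
        rfl
  | succ k ih =>
      intro hk1
      have hk : k < 2 ^ count := by omega
      obtain ⟨hlen, hdp⟩ := ih (by omega)
      rw [List.range_succ, List.foldl_append, List.foldl_cons, List.foldl_nil]
      set DPK : List Int := (List.range k).foldl
          (fun dp k' => if dp.getD k' 0 == 20 then dp else pvDpInner moves k' dp)
          ((List.replicate (2^count) (20:Int)).set 0 0) with hDPK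
      have hVkk := Vk_stab hm k k (le_refl k)
      by_cases h20 : Vk moves k (k:Int) = 20
      · have hbeq : (DPK.getD k 0 == 20) = true := by rw [hdp k hk, h20]; rfl
        rw [hbeq, if_pos rfl]
        refine ⟨hlen, fun s hs => ?_⟩
        rw [hdp s hs]
        congr 1
        have hDd20 : Dd moves (k:Int) = 20 := by rw [← hVkk]; exact h20
        rw [Vk_succ]
        split_ifs with h
        · rw [hDd20]
          norm_num
          exact Vk_le_20 moves k _
        · rfl
      · have hbeq : (DPK.getD k 0 == 20) = false := by
          rw [hdp k hk]
          simp only [beq_eq_false_iff_ne, ne_eq]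
          intro heq
          exact h20 (by exact_mod_cast heq)
        rw [hbeq, if_neg (by simp)]
        have hDklt : Dd moves (k:Int) < 20 := by
          have h2 := Dd_le_20 moves (k:Int)
          omega
        obtain ⟨hlF, hF⟩ := pv_inner_inv moves hm k hk hDklt moves hm
          (fun s => Vk moves k (s:Int)) DPK
          hlen (fun s => Vk_le_20 moves k _) hVkk hdp
        have hEq : pvDpInner moves k DPK
            = moves.foldl (fun dp m => dp.set (PySem.Int.bor (k:Int) m).toNat
                (min (dp.getD (PySem.Int.bor (k:Int) m).toNat 0) (dp.getD k 0 + 1))) DPK := rfl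
        rw [hEq]
        refine ⟨hlF, fun s hs => ?_⟩
        rw [hF s hs]
        congr 1
        rw [Vk_succ]
        split_ifs with h
        · rw [Nat.min_eq_right (by omega : Dd moves (k:Int) + 1 ≤ 20)]
        · rfl

lemma pv_pyGet_last (l : List Int) (h : l ≠ []) :
    (PySem.List.pyGet? l (-1)).getD 0 = l.getD (l.length - 1) 0 := by
  rw [PySem.List.pyGet?_neg_one, List.getLast?_eq_getElem?, List.getD_eq_getElem?_getD]

lemma pv_dp_result {count : Nat} (moves : List Int)
    (hm : ∀ m ∈ moves, 0 ≤ m ∧ m < (2:Int)^count) :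
    (PySem.List.pyGet? (pvDpLoop moves (1 <<< count)) (-1)).getD 0
      = ((Dd moves (((2^count - 1 : Nat)) : Int) : Nat) : Int) := by
  have hsh : (1 <<< count : Nat) = 2^count := Nat.one_shiftLeft count
  have hpos : 0 < 2^count := Nat.two_pow_pos count
  unfold pvDpLoop
  rw [hsh]
  obtain ⟨hlen, hdp⟩ := pv_dp_inv moves hm (2^count) (le_refl _)
  rw [pv_pyGet_last _ (by intro hnil; rw [hnil] at hlen; simp at hlen; omega)]
  rw [hlen, hdp (2^count - 1) (by omega)]
  rw [Vk_stab hm (2^count) (2^count - 1) (by omega)]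

-- ---------- BFS side ----------
def Rle (moves : List Int) (s : Int) (d : Nat) : Prop := ∃ e ≤ d, Reach moves s e

lemma pv_mem_inner_fold (moves : List Int) (seen : PySem.Set Int) (s : Int) :
    ∀ (ml : List Int) (acc : PySem.Set Int) (x : Int),
      (x ∈ ml.foldl (fun acc m =>
          if !(PySem.Set.contains seen (PySem.Int.bor s m))
          then PySem.Set.add acc (PySem.Int.bor s m) else acc) acc)
      ↔ x ∈ acc ∨ ∃ m ∈ ml, PySem.Int.bor s m = x ∧ x ∉ seen := by
  intro ml
  induction ml with
  | nil => intro acc x; simp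
  | cons m rest ih =>
      intro acc x
      rw [List.foldl_cons]
      by_cases hmem : PySem.Int.bor s m ∈ seen
      · have hc : PySem.Set.contains seen (PySem.Int.bor s m) = true :=
          (PySem.Set.contains_iff _ _).mpr hmem
        rw [hc]
        simp only [Bool.not_true, Bool.false_eq_true, if_false]
        rw [ih]
        simp only [List.exists_mem_cons_iff]
        constructor
        · rintro (h | h)
          · exact Or.inl h
          · exact Or.inr (Or.inr h)
        · rintro (h | ⟨⟨heq, hns⟩ | h⟩)
          · exact Or.inl h
          · exact absurd (heq ▸ hmem) hns
          · exact Or.inr h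
      · have hc : PySem.Set.contains seen (PySem.Int.bor s m) = false := by
          rw [← Bool.not_eq_true]; intro h; exact hmem ((PySem.Set.contains_iff _ _).mp h)
        rw [hc]
        simp only [Bool.not_false, if_true]
        rw [ih]
        simp only [PySem.Set.mem_add, List.exists_mem_cons_iff]
        constructor
        · rintro (⟨h | rfl⟩ | h)
          · exact Or.inl h
          · exact Or.inr (Or.inl ⟨rfl, hmem⟩)
          · exact Or.inr (Or.inr h)
        · rintro (h | ⟨⟨rfl, hns⟩ | h⟩)
          · exact Or.inl (Or.inl h)
          · exact Or.inl (Or.inr rfl)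
          · exact Or.inr h

lemma pv_mem_bfsStep (moves : List Int) (seen frontier : PySem.Set Int) (x : Int) :
    x ∈ bBfsStep moves seen frontier
      ↔ ∃ s ∈ frontier, ∃ m ∈ moves, PySem.Int.bor s m = x ∧ x ∉ seen := by
  unfold bBfsStep
  suffices h : ∀ (fl : List Int) (acc : PySem.Set Int),
      (x ∈ fl.foldl (fun acc s => moves.foldl (fun acc m =>
          if !(PySem.Set.contains seen (PySem.Int.bor s m))
          then PySem.Set.add acc (PySem.Int.bor s m) else acc) acc) acc)
      ↔ x ∈ acc ∨ ∃ s ∈ fl, ∃ m ∈ moves, PySem.Int.bor s m = x ∧ x ∉ seen by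
    rw [h frontier PySem.Set.empty]
    simp [PySem.Set.empty]
  intro fl
  induction fl with
  | nil => intro acc; simp
  | cons f rest ih =>
      intro acc
      rw [List.foldl_cons, ih, pv_mem_inner_fold moves seen f moves]
      simp only [List.exists_mem_cons_iff]
      exact or_assoc

lemma pv_bfs_main {count : Nat} {moves : List Int}
    (hm : ∀ m ∈ moves, 0 ≤ m ∧ m < (2:Int)^count) (full : Int) :
    ∀ (fuel d : Nat) (frontier seen : PySem.Set Int),
      d + fuel = 20 →
      (∀ x, x ∈ frontier ↔ (Reach moves x d ∧ ∀ e, Reach moves x e → d ≤ e)) →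
      (∀ x, x ∈ seen ↔ Rle moves x d) →
      (∀ e, e < d → ¬ Reach moves full e) →
      bBfsGo moves full d fuel frontier seen = ((Dd moves full : Nat) : Int) := by
  intro fuel
  induction fuel with
  | zero =>
      intro d frontier seen hd _ _ hnot
      have hDd : Dd moves full = 20 :=
        le_antisymm (Dd_le_20 _ _) (by
          have := Dd_ge_of_not_reach (d := 20) (by intro e he; exact hnot e (by omega)) (le_refl 20)
          omega)
      rw [bBfsGo, hDd]
      norm_num
  | succ fuel ih =>
      intro d frontier seen hd hfr hsn hnot
      rw [bBfsGo]
      by_cases hc : PySem.Set.contains seen full = true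
      · rw [if_pos hc]
        obtain ⟨e, he, hre⟩ := (hsn full).mp ((PySem.Set.contains_iff _ _).mp hc)
        have hed : e = d := by
          by_contra hne
          exact hnot e (by omega) hre
        subst hed
        have hDd : Dd moves full = e :=
          le_antisymm (Dd_le_of_reach hre) (Dd_ge_of_not_reach hnot (by omega))
        rw [hDd]
      · rw [if_neg (by simpa using (fun hmem => hc ((PySem.Set.contains_iff _ _).mpr hmem) : full ∈ seen → False))]
        have hfull_not : ¬ Rle moves full d := fun h =>
          hc ((PySem.Set.contains_iff _ _).mpr ((hsn full).mpr h))
        have hnot' : ∀ e, e < d + 1 → ¬ Reach moves full e := by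
          intro e he hre
          exact hfull_not ⟨e, by omega, hre⟩
        have hfrX : ∀ x, x ∈ bBfsStep moves seen frontier ↔
            (Reach moves x (d+1) ∧ ∀ e, Reach moves x e → d + 1 ≤ e) := by
          intro x
          rw [pv_mem_bfsStep]
          constructor
          · rintro ⟨s, hsfr, m, hmm, rfl, hxs⟩
            obtain ⟨hrs, hmin⟩ := (hfr s).mp hsfr
            refine ⟨hrs.step hmm, ?_⟩
            intro e hre
            by_contra hlt
            exact hxs ((hsn _).mpr ⟨e, by omega, hre⟩)
          · rintro ⟨hr, hmin⟩
            have hx_not_seen : x ∉ seen := by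
              intro hx
              obtain ⟨e, he, hre⟩ := (hsn x).mp hx
              have := hmin e hre
              omega
            cases hr with
            | @step p _ m hp hmm =>
                have hpmin : ∀ e, Reach moves p e → d ≤ e := by
                  intro e hre
                  by_contra hlt
                  have := hmin (e+1) (hre.step hmm)
                  omega
                exact ⟨p, (hfr p).mpr ⟨hp, hpmin⟩, m, hmm, rfl, hx_not_seen⟩
        have hsnX : ∀ x, x ∈ PySem.Set.union seen (bBfsStep moves seen frontier) ↔
            Rle moves x (d+1) := by
          intro x
          rw [PySem.Set.mem_union, hsn, hfrX]
          constructor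
          · rintro (⟨e, he, hre⟩ | ⟨hr, _⟩)
            · exact ⟨e, by omega, hre⟩
            · exact ⟨d+1, le_refl _, hr⟩
          · rintro ⟨e, he, hre⟩
            by_cases hxd : Rle moves x d
            · exact Or.inl hxd
            · refine Or.inr ⟨?_, ?_⟩
              · have hed : e = d + 1 := by
                  by_contra hne
                  exact hxd ⟨e, by omega, hre⟩
                exact hed ▸ hre
              · intro e' hre'
                by_contra hlt
                exact hxd ⟨e', by omega, hre'⟩
        exact ih (d+1) _ _ (by omega) hfrX hsnX hnot'

lemma pv_bfs_result {count : Nat} (moves : List Int)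
    (hm : ∀ m ∈ moves, 0 ≤ m ∧ m < (2:Int)^count) :
    bBfsGo moves (((1:Int) <<< count) - 1) 0 20
        (PySem.Set.ofList [0]) (PySem.Set.ofList [0])
      = ((Dd moves (((2^count - 1 : Nat)) : Int) : Nat) : Int) := by
  have hfull : ((1:Int) <<< count) - 1 = ((2^count - 1 : Nat) : Int) := by
    have h1 : (1:Nat) ≤ 2^count := Nat.one_le_two_pow
    rw [pv_one_shiftLeft_int, ← pv_two_pow_cast]
    omega
  rw [hfull]
  refine pv_bfs_main hm _ 20 0 _ _ (by norm_num) ?_ ?_ ?_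
  · intro x
    simp only [PySem.Set.mem_ofList, List.mem_singleton]
    constructor
    · rintro rfl
      exact ⟨Reach.zero, fun e _ => Nat.zero_le e⟩
    · rintro ⟨hr, _⟩
      exact reach_zero_eq hr
  · intro x
    simp only [PySem.Set.mem_ofList, List.mem_singleton]
    constructor
    · rintro rfl
      exact ⟨0, le_refl 0, Reach.zero⟩
    · rintro ⟨e, he, hre⟩
      have : e = 0 := by omega
      subst this
      exact reach_zero_eq hre
  · intro e he
    omega

-- ---------- preprocessing: A's grid of masks IS B's per-cell mask of the center list ----------
def pvCond (grid : List (List String)) (odd : Int) (p : Int × Int) : Bool :=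
  PySem.Int.mod (p.1 + p.2) 2 == odd
    && bOffsets.all (fun d =>
      (PySem.List.pyGet? ((PySem.List.pyGet? grid (p.1 + d.1)).getD []) (p.2 + d.2)).getD "" == "B")

def pvPairs : List (Int × Int) :=
  (PySem.List.pyRange 1 6 1).flatMap (fun i => (PySem.List.pyRange 1 6 1).map (fun j => (i, j)))

lemma pvPairs_bounds : ∀ q ∈ pvPairs, 1 ≤ q.1 ∧ q.1 ≤ 5 ∧ 1 ≤ q.2 ∧ q.2 ≤ 5 := by
  intro q hq
  unfold pvPairs at hq
  simp only [List.mem_flatMap, List.mem_map, PySem.List.mem_pyRange_one] at hq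
  obtain ⟨i, hi, j, hj, rfl⟩ := hq
  exact ⟨by omega, by omega, by omega, by omega⟩

lemma bCenters_eq (grid : List (List String)) (odd : Int) :
    bCenters grid odd = pvPairs.filterMap (fun p => if pvCond grid odd p then some p else none) := by
  unfold bCenters pvPairs pvCond
  simp [List.filterMap_flatMap, List.filterMap_map, Function.comp]

lemma pvBuild_eq (grid : List (List String)) (odd : Int) :
    pvBuild grid odd
      = pvPairs.foldl (fun st p => pvBuildCell grid odd st p.1 p.2)
          (List.replicate 7 (List.replicate 7 0), 0) := by
  unfold pvBuild pvPairs
  rw [List.foldl_flatMap]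
  have h : ∀ (st : List (List Int) × Nat) (i : Int),
      List.foldl (fun st j => pvBuildCell grid odd st i j) st (PySem.List.pyRange 1 6 1)
        = List.foldl (fun st p => pvBuildCell grid odd st p.1 p.2) st
            (List.map (fun j => (i, j)) (PySem.List.pyRange 1 6 1)) := by
    intro st i
    rw [List.foldl_map]
  simp only [h]

lemma crossEq (grid : List (List String)) (i j : Int) :
    (bOffsets.all (fun d =>
        (PySem.List.pyGet? ((PySem.List.pyGet? grid (i + d.1)).getD []) (j + d.2)).getD "" == "B"))
      = pvIsCross grid i j := by
  have h1 : i + (-1:Int) = i - 1 := by ring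
  have h2 : j + (-1:Int) = j - 1 := by ring
  simp only [bOffsets, List.all_cons, List.all_nil, h1, h2, add_zero, pvIsCross, pvCell,
    Bool.and_true, Bool.and_assoc]

lemma pvOr2_length (g : List (List Int)) (a b t : Int) : (pvOr2 g a b t).length = g.length := by
  simp [pvOr2]

lemma pvOr2_rows {g : List (List Int)} (hg : g.length = 7) (h7 : ∀ row ∈ g, row.length = 7)
    {a : Int} (ha : 0 ≤ a ∧ a < 7) (b t : Int) : ∀ row ∈ pvOr2 g a b t, row.length = 7 := by
  intro row hrow
  rcases List.mem_or_eq_of_mem_set hrow with h | rfl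
  · exact h7 _ h
  · have hN : a.toNat < g.length := by omega
    rw [List.length_set]
    rw [List.getD_eq_getElem?_getD, List.getElem?_eq_getElem hN]
    exact h7 _ (List.getElem_mem hN)

lemma pvGet2_or2 {g : List (List Int)} (hg : g.length = 7) (h7 : ∀ row ∈ g, row.length = 7)
    {a b x y : Int} (t : Int) (ha : 0 ≤ a ∧ a < 7) (hb : 0 ≤ b ∧ b < 7)
    (hx : 0 ≤ x ∧ x < 7) (hy : 0 ≤ y ∧ y < 7) :
    pvGet2 (pvOr2 g a b t) x y
      = if x = a ∧ y = b then PySem.Int.bor (pvGet2 g x y) t else pvGet2 g x y := by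
  have haN : a.toNat < g.length := by omega
  have hrowlen : (g.getD a.toNat []).length = 7 := by
    rw [List.getD_eq_getElem?_getD, List.getElem?_eq_getElem haN]
    exact h7 _ (List.getElem_mem haN)
  unfold pvOr2 pvGet2
  by_cases hxa : x = a
  · subst hxa
    rw [pv_getD_set_self haN]
    by_cases hyb : y = b
    · subst hyb
      rw [pv_getD_set_self (by omega : y.toNat < (g.getD x.toNat []).length)]
      rw [if_pos ⟨rfl, rfl⟩]
    · rw [pv_getD_set_ne (show b.toNat ≠ y.toNat by omega)]
      rw [if_neg (by tauto)]
  · rw [pv_getD_set_ne (show a.toNat ≠ x.toNat by omega)]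
    rw [if_neg (by tauto)]

lemma bMask_nil (x y : Int) : bMask [] x y = 0 := rfl

lemma bMask_append (cs : List (Int × Int)) (c : Int × Int) (x y : Int) :
    bMask (cs ++ [c]) x y
      = if bCovers c x y then PySem.Int.bor (bMask cs x y) (((1 <<< cs.length : Nat)) : Int)
        else bMask cs x y := by
  unfold bMask
  rw [PySem.List.enumerate_append, List.foldl_append]
  have h0 : ((0:Int) + (cs.length : Int)) = (cs.length : Int) := by ring
  simp only [PySem.List.enumerate_cons, PySem.List.enumerate_nil, List.foldl_cons,
    List.foldl_nil, h0, Int.toNat_natCast]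

lemma bMask_bound (cs : List (Int × Int)) (x y : Int) :
    0 ≤ bMask cs x y ∧ bMask cs x y < (2:Int)^cs.length := by
  induction cs using List.reverseRecOn with
  | nil => simp [bMask_nil]
  | append_singleton cs c ih =>
      rw [bMask_append]
      simp only [List.length_append, List.length_cons, List.length_nil]
      have hpow : (2:Int)^cs.length < 2^(cs.length+1) := by
        rw [pow_succ]
        have : (0:Int) < 2^cs.length := by positivity
        linarith
      split_ifs
      · have ht0 : (0:Int) ≤ (((1 <<< cs.length : Nat)) : Int) := Int.natCast_nonneg _
        have ht1 : (((1 <<< cs.length : Nat)) : Int) < 2^(cs.length+1) := by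
          rw [Nat.one_shiftLeft, pv_two_pow_cast]; exact hpow
        exact ⟨pv_bor_nonneg ih.1 ht0, pv_bor_lt ih.1 ht0 (lt_trans ih.2 hpow) ht1⟩
      · exact ⟨ih.1, lt_trans ih.2 hpow⟩

lemma bCovers_iff {i j x y : Int} :
    bCovers (i, j) x y = true
      ↔ (x = i ∧ y = j) ∨ ((x - i = 1 ∨ x - i = -1) ∧ (y - j = 1 ∨ y - j = -1)) := by
  simp only [bCovers, Bool.or_eq_true, Bool.and_eq_true, beq_iff_eq]
  omega

lemma pv_init_val (x y : Int) : pvGet2 (List.replicate 7 (List.replicate 7 (0:Int))) x y = 0 := by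
  unfold pvGet2
  rcases pv_getD_mem (List.replicate 7 (List.replicate 7 (0:Int))) [] x.toNat with h | h
  · rw [List.eq_of_mem_replicate h]
    rcases pv_getD_mem (List.replicate 7 (0:Int)) 0 y.toNat with h2 | h2
    · exact List.eq_of_mem_replicate h2
    · exact h2
  · rw [h]; rfl

lemma stepA_inv (grid : List (List String)) (odd : Int) (p : Int × Int)
    (hp : 1 ≤ p.1 ∧ p.1 ≤ 5 ∧ 1 ≤ p.2 ∧ p.2 ≤ 5)
    (cs : List (Int × Int)) (st : List (List Int) × Nat)
    (hc : st.2 = cs.length) (hlen : st.1.length = 7) (hrows : ∀ row ∈ st.1, row.length = 7)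
    (hval : ∀ x y : Int, 0 ≤ x → x < 7 → 0 ≤ y → y < 7 → pvGet2 st.1 x y = bMask cs x y) :
    (pvBuildCell grid odd st p.1 p.2).2
        = (cs ++ (if pvCond grid odd p then [p] else [])).length
    ∧ (pvBuildCell grid odd st p.1 p.2).1.length = 7
    ∧ (∀ row ∈ (pvBuildCell grid odd st p.1 p.2).1, row.length = 7)
    ∧ (∀ x y : Int, 0 ≤ x → x < 7 → 0 ≤ y → y < 7 →
        pvGet2 (pvBuildCell grid odd st p.1 p.2).1 x y
          = bMask (cs ++ (if pvCond grid odd p then [p] else [])) x y) := by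
  obtain ⟨i, j⟩ := p
  obtain ⟨hi1, hi5, hj1, hj5⟩ := hp
  simp only at hi1 hi5 hj1 hj5
  unfold pvBuildCell pvCond
  simp only [crossEq grid i j]
  by_cases hmod : (PySem.Int.mod (i + j) 2 == odd) = true
  · rw [if_pos hmod]
    by_cases hcr : pvIsCross grid i j = true
    · rw [if_pos hcr]
      have hcond : (PySem.Int.mod (i + j) 2 == odd && pvIsCross grid i j) = true := by
        rw [hmod, hcr]; rfl
      rw [if_pos hcond]
      -- the five sequential OR-updates
      set t : Int := ((1 <<< st.2 : Nat) : Int) with ht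
      set g0 := st.1 with hg0
      set g1 := pvOr2 g0 i j t with hg1
      set g2 := pvOr2 g1 (i-1) (j-1) t with hg2
      set g3 := pvOr2 g2 (i-1) (j+1) t with hg3
      set g4 := pvOr2 g3 (i+1) (j-1) t with hg4
      set g5 := pvOr2 g4 (i+1) (j+1) t with hg5
      have hL1 : g1.length = 7 := by rw [hg1, pvOr2_length]; exact hlen
      have hR1 : ∀ row ∈ g1, row.length = 7 := pvOr2_rows hlen hrows ⟨by omega, by omega⟩ _ _
      have hL2 : g2.length = 7 := by rw [hg2, pvOr2_length]; exact hL1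
      have hR2 : ∀ row ∈ g2, row.length = 7 := pvOr2_rows hL1 hR1 ⟨by omega, by omega⟩ _ _
      have hL3 : g3.length = 7 := by rw [hg3, pvOr2_length]; exact hL2
      have hR3 : ∀ row ∈ g3, row.length = 7 := pvOr2_rows hL2 hR2 ⟨by omega, by omega⟩ _ _
      have hL4 : g4.length = 7 := by rw [hg4, pvOr2_length]; exact hL3
      have hR4 : ∀ row ∈ g4, row.length = 7 := pvOr2_rows hL3 hR3 ⟨by omega, by omega⟩ _ _
      have hL5 : g5.length = 7 := by rw [hg5, pvOr2_length]; exact hL4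
      have hR5 : ∀ row ∈ g5, row.length = 7 := pvOr2_rows hL4 hR4 ⟨by omega, by omega⟩ _ _
      refine ⟨by simp [hc], hL5, hR5, ?_⟩
      intro x y hx0 hx7 hy0 hy7
      rw [hg5, pvGet2_or2 hL4 hR4 t ⟨by omega, by omega⟩ ⟨by omega, by omega⟩ ⟨hx0, hx7⟩ ⟨hy0, hy7⟩]
      rw [hg4, pvGet2_or2 hL3 hR3 t ⟨by omega, by omega⟩ ⟨by omega, by omega⟩ ⟨hx0, hx7⟩ ⟨hy0, hy7⟩]
      rw [hg3, pvGet2_or2 hL2 hR2 t ⟨by omega, by omega⟩ ⟨by omega, by omega⟩ ⟨hx0, hx7⟩ ⟨hy0, hy7⟩]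
      rw [hg2, pvGet2_or2 hL1 hR1 t ⟨by omega, by omega⟩ ⟨by omega, by omega⟩ ⟨hx0, hx7⟩ ⟨hy0, hy7⟩]
      rw [hg1, pvGet2_or2 hlen hrows t ⟨by omega, by omega⟩ ⟨by omega, by omega⟩ ⟨hx0, hx7⟩ ⟨hy0, hy7⟩]
      have htc : t = (((1 <<< cs.length : Nat)) : Int) := by rw [ht, hc]
      rw [bMask_append, hval x y hx0 hx7 hy0 hy7, htc]
      rw [show ((if bCovers (i, j) x y then PySem.Int.bor (bMask cs x y) (((1 <<< cs.length : Nat)) : Int)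
            else bMask cs x y))
          = (if (x = i ∧ y = j) ∨ ((x - i = 1 ∨ x - i = -1) ∧ (y - j = 1 ∨ y - j = -1))
            then PySem.Int.bor (bMask cs x y) (((1 <<< cs.length : Nat)) : Int) else bMask cs x y)
        from by
          by_cases hcv : bCovers (i, j) x y = true
          · rw [if_pos hcv, if_pos (bCovers_iff.mp hcv)]
          · rw [if_neg (by simpa using hcv), if_neg (fun hh => by
              simp [bCovers_iff.mpr hh] at hcv)]]
      split_ifs <;> first | rfl | omega
    · rw [if_neg hcr]
      have hcond : (PySem.Int.mod (i + j) 2 == odd && pvIsCross grid i j) = false := by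
        rw [Bool.and_eq_false_iff]; right; simpa using hcr
      rw [hcond]
      simp only [Bool.false_eq_true, if_false, List.append_nil]
      exact ⟨hc, hlen, hrows, hval⟩
  · rw [if_neg hmod]
    have hcond : (PySem.Int.mod (i + j) 2 == odd && pvIsCross grid i j) = false := by
      rw [Bool.and_eq_false_iff]; left; simpa using hmod
    rw [hcond]
    simp only [Bool.false_eq_true, if_false, List.append_nil]
    exact ⟨hc, hlen, hrows, hval⟩

lemma invMain (grid : List (List String)) (odd : Int) :
    ∀ (ps cs : List (Int × Int)) (st : List (List Int) × Nat),
      (∀ q ∈ ps, 1 ≤ q.1 ∧ q.1 ≤ 5 ∧ 1 ≤ q.2 ∧ q.2 ≤ 5) →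
      st.2 = cs.length → st.1.length = 7 → (∀ row ∈ st.1, row.length = 7) →
      (∀ x y : Int, 0 ≤ x → x < 7 → 0 ≤ y → y < 7 → pvGet2 st.1 x y = bMask cs x y) →
      ((ps.foldl (fun st q => pvBuildCell grid odd st q.1 q.2) st).2
          = (cs ++ ps.filterMap (fun q => if pvCond grid odd q then some q else none)).length)
      ∧ (∀ x y : Int, 0 ≤ x → x < 7 → 0 ≤ y → y < 7 →
          pvGet2 (ps.foldl (fun st q => pvBuildCell grid odd st q.1 q.2) st).1 x y
            = bMask (cs ++ ps.filterMap (fun q => if pvCond grid odd q then some q else none)) x y) := by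
  intro ps
  induction ps with
  | nil =>
      intro cs st _ hc hlen hrows hval
      simp only [List.foldl_nil, List.filterMap_nil, List.append_nil]
      exact ⟨hc, hval⟩
  | cons q ps ih =>
      intro cs st hb hc hlen hrows hval
      obtain ⟨h1, h2, h3, h4⟩ :=
        stepA_inv grid odd q (hb q List.mem_cons_self) cs st hc hlen hrows hval
      have hbs : ∀ r ∈ ps, 1 ≤ r.1 ∧ r.1 ≤ 5 ∧ 1 ≤ r.2 ∧ r.2 ≤ 5 :=
        fun r hr => hb r (List.mem_cons_of_mem q hr)
      obtain ⟨hA, hB⟩ := ih (cs ++ (if pvCond grid odd q then [q] else []))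
        (pvBuildCell grid odd st q.1 q.2) hbs h1 h2 h3 h4
      rw [List.foldl_cons]
      have hstep : (cs ++ (if pvCond grid odd q then [q] else []))
            ++ ps.filterMap (fun r => if pvCond grid odd r then some r else none)
          = cs ++ (q :: ps).filterMap (fun r => if pvCond grid odd r then some r else none) := by
        by_cases hq : pvCond grid odd q = true <;>
          simp [List.filterMap_cons, hq, List.append_assoc]
      rw [hstep] at hA hB
      exact ⟨hA, hB⟩

lemma build_char (grid : List (List String)) (odd : Int) :
    (pvBuild grid odd).2 = (bCenters grid odd).length
    ∧ (∀ x y : Int, 0 ≤ x → x < 7 → 0 ≤ y → y < 7 →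
        pvGet2 (pvBuild grid odd).1 x y = bMask (bCenters grid odd) x y) := by
  rw [pvBuild_eq, bCenters_eq]
  have h := invMain grid odd pvPairs [] (List.replicate 7 (List.replicate 7 0), 0)
    pvPairs_bounds rfl (by simp) (by intro row hrow; rw [List.eq_of_mem_replicate hrow]; simp)
    (fun x y _ _ _ _ => pv_init_val x y)
  simpa using h

-- ---------- the two candidate-move sets have the same members ----------
lemma memA_inner (g : List (List Int)) (i : Int) :
    ∀ (lj : List Int) (acc : PySem.Set Int) (x : Int),
      (x ∈ lj.foldl (fun ms j =>
          if !(PySem.Set.contains ms (pvGet2 g i j)) && pvGet2 g i j != 0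
          then PySem.Set.add ms (pvGet2 g i j) else ms) acc)
      ↔ x ∈ acc ∨ ∃ j ∈ lj, pvGet2 g i j = x ∧ x ≠ 0 := by
  intro lj
  induction lj with
  | nil => intro acc x; simp
  | cons j rest ih =>
      intro acc x
      rw [List.foldl_cons]
      by_cases hz : pvGet2 g i j = 0
      · rw [if_neg (by simp [hz])]
        rw [ih]
        simp only [List.exists_mem_cons_iff]
        constructor
        · rintro (h | h)
          · exact Or.inl h
          · exact Or.inr (Or.inr h)
        · rintro (h | ⟨⟨hv, hx0⟩ | h⟩)
          · exact Or.inl h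
          · exact (hx0 (by rw [← hv, hz])).elim
          · exact Or.inr h
      · by_cases hcn : pvGet2 g i j ∈ acc
        · have hb : PySem.Set.contains acc (pvGet2 g i j) = true :=
            (PySem.Set.contains_iff _ _).mpr hcn
          rw [if_neg (by rw [hb]; simp)]
          rw [ih]
          simp only [List.exists_mem_cons_iff]
          constructor
          · rintro (h | h)
            · exact Or.inl h
            · exact Or.inr (Or.inr h)
          · rintro (h | ⟨⟨hv, hx0⟩ | h⟩)
            · exact Or.inl h
            · exact Or.inl (hv ▸ hcn)
            · exact Or.inr h
        · have hcc : PySem.Set.contains acc (pvGet2 g i j) = false := by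
            rw [← Bool.not_eq_true]; intro h; exact hcn ((PySem.Set.contains_iff _ _).mp h)
          rw [if_pos (by rw [hcc]; simpa using hz)]
          rw [ih]
          simp only [PySem.Set.mem_add, List.exists_mem_cons_iff]
          constructor
          · rintro (⟨h | rfl⟩ | h)
            · exact Or.inl h
            · exact Or.inr (Or.inl ⟨rfl, hz⟩)
            · exact Or.inr (Or.inr h)
          · rintro (h | ⟨⟨rfl, hx0⟩ | h⟩)
            · exact Or.inl (Or.inl h)
            · exact Or.inl (Or.inr rfl)
            · exact Or.inr h

lemma mem_movesSetA (g : List (List Int)) (x : Int) :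
    x ∈ pvMovesSet g
      ↔ ∃ i : Int, (0 ≤ i ∧ i < 7) ∧ ∃ j : Int, (0 ≤ j ∧ j < 7) ∧ pvGet2 g i j = x ∧ x ≠ 0 := by
  unfold pvMovesSet
  suffices h : ∀ (li : List Int) (acc : PySem.Set Int),
      (x ∈ li.foldl (fun ms i => (PySem.List.pyRange 0 7 1).foldl (fun ms j =>
          if !(PySem.Set.contains ms (pvGet2 g i j)) && pvGet2 g i j != 0
          then PySem.Set.add ms (pvGet2 g i j) else ms) ms) acc)
      ↔ x ∈ acc ∨ ∃ i ∈ li, ∃ j ∈ PySem.List.pyRange 0 7 1, pvGet2 g i j = x ∧ x ≠ 0 by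
    rw [h (PySem.List.pyRange 0 7 1) PySem.Set.empty]
    simp [PySem.Set.empty, PySem.List.mem_pyRange_one]
  intro li
  induction li with
  | nil => intro acc; simp
  | cons i rest ih =>
      intro acc
      rw [List.foldl_cons, ih, memA_inner]
      simp only [List.exists_mem_cons_iff]
      exact or_assoc

lemma memB_inner (centers : List (Int × Int)) (i : Int) :
    ∀ (lj : List Int) (acc : PySem.Set Int) (x : Int),
      (x ∈ lj.foldl (fun ms j =>
          let m := bMask centers i j
          if m != 0 then PySem.Set.add ms m else ms) acc)
      ↔ x ∈ acc ∨ ∃ j ∈ lj, bMask centers i j = x ∧ x ≠ 0 := by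
  intro lj
  induction lj with
  | nil => intro acc x; simp
  | cons j rest ih =>
      intro acc x
      rw [List.foldl_cons]
      by_cases hz : bMask centers i j = 0
      · have hacc : (let m := bMask centers i j
            if m != 0 then PySem.Set.add acc m else acc) = acc := by simp [hz]
        rw [hacc, ih]
        simp only [List.exists_mem_cons_iff]
        constructor
        · rintro (h | h)
          · exact Or.inl h
          · exact Or.inr (Or.inr h)
        · rintro (h | ⟨⟨hv, hx0⟩ | h⟩)
          · exact Or.inl h
          · exact (hx0 (by rw [← hv, hz])).elim
          · exact Or.inr h
      · have hacc : (let m := bMask centers i j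
            if m != 0 then PySem.Set.add acc m else acc)
              = PySem.Set.add acc (bMask centers i j) := by simp [hz]
        rw [hacc, ih]
        simp only [PySem.Set.mem_add, List.exists_mem_cons_iff]
        constructor
        · rintro (⟨h | rfl⟩ | h)
          · exact Or.inl h
          · exact Or.inr (Or.inl ⟨rfl, hz⟩)
          · exact Or.inr (Or.inr h)
        · rintro (h | ⟨⟨rfl, hx0⟩ | h⟩)
          · exact Or.inl (Or.inl h)
          · exact Or.inl (Or.inr rfl)
          · exact Or.inr h

lemma mem_masksB (centers : List (Int × Int)) (x : Int) :
    x ∈ bMasks centers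
      ↔ ∃ i : Int, (0 ≤ i ∧ i < 7) ∧ ∃ j : Int, (0 ≤ j ∧ j < 7) ∧ bMask centers i j = x ∧ x ≠ 0 := by
  unfold bMasks
  suffices h : ∀ (li : List Int) (acc : PySem.Set Int),
      (x ∈ li.foldl (fun ms i => (PySem.List.pyRange 0 7 1).foldl (fun ms j =>
          let m := bMask centers i j
          if m != 0 then PySem.Set.add ms m else ms) ms) acc)
      ↔ x ∈ acc ∨ ∃ i ∈ li, ∃ j ∈ PySem.List.pyRange 0 7 1, bMask centers i j = x ∧ x ≠ 0 by
    rw [h (PySem.List.pyRange 0 7 1) PySem.Set.empty]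
    simp [PySem.Set.empty, PySem.List.mem_pyRange_one]
  intro li
  induction li with
  | nil => intro acc; simp
  | cons i rest ih =>
      intro acc
      rw [List.foldl_cons, ih, memB_inner]
      simp only [List.exists_mem_cons_iff]
      exact or_assoc

-- ---------- the two maximal-move filters have the same members ----------
lemma coverAll_iff (m : Int) : ∀ (l : List Int),
    pvCoverAll m l = true ↔ ∀ n ∈ l, n = m ∨ PySem.Int.band n m ≠ m := by
  intro l
  induction l with
  | nil => simp [pvCoverAll]
  | cons n rest ih =>
      unfold pvCoverAll
      by_cases h1 : m = n
      · rw [if_pos (by simp [h1]), ih]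
        constructor
        · intro h p hp
          rcases List.mem_cons.mp hp with rfl | hp'
          · exact Or.inl h1.symm
          · exact h p hp'
        · intro h p hp
          exact h p (List.mem_cons_of_mem n hp)
      · rw [if_neg (by simp [h1])]
        by_cases h2 : PySem.Int.band n m = m
        · rw [if_pos (by simp [h2])]
          constructor
          · intro h; exact absurd h (by simp)
          · intro h
            rcases h n List.mem_cons_self with h' | h'
            · exact absurd h'.symm h1
            · exact absurd h2 h'
        · rw [if_neg (by simp [h2]), ih]
          constructor
          · intro h p hp
            rcases List.mem_cons.mp hp with rfl | hp'
            · exact Or.inr h2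
            · exact h p hp'
          · intro h p hp
            exact h p (List.mem_cons_of_mem n hp)

lemma mem_foldl_add_if (q : Int → Bool) :
    ∀ (l : List Int) (acc : PySem.Set Int) (x : Int),
      (x ∈ l.foldl (fun mc mi => if q mi then PySem.Set.add mc mi else mc) acc)
      ↔ x ∈ acc ∨ (x ∈ l ∧ q x = true) := by
  intro l
  induction l with
  | nil => intro acc x; simp
  | cons a rest ih =>
      intro acc x
      rw [List.foldl_cons]
      by_cases hq : q a = true
      · rw [if_pos hq, ih]
        simp only [PySem.Set.mem_add, List.mem_cons]
        constructor
        · rintro (⟨h | rfl⟩ | ⟨h1, h2⟩)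
          · exact Or.inl h
          · exact Or.inr ⟨Or.inl rfl, hq⟩
          · exact Or.inr ⟨Or.inr h1, h2⟩
        · rintro (h | ⟨rfl | h1, h2⟩)
          · exact Or.inl (Or.inl h)
          · exact Or.inl (Or.inr rfl)
          · exact Or.inr ⟨h1, h2⟩
      · rw [if_neg hq, ih]
        simp only [List.mem_cons]
        constructor
        · rintro (h | ⟨h1, h2⟩)
          · exact Or.inl h
          · exact Or.inr ⟨Or.inr h1, h2⟩
        · rintro (h | ⟨rfl | h1, h2⟩)
          · exact Or.inl h
          · exact absurd h2 hq
          · exact Or.inr ⟨h1, h2⟩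

lemma mem_maximalA (S : PySem.Set Int) (x : Int) :
    x ∈ pvMaximal S ↔ x ∈ S ∧ ∀ n ∈ S, n = x ∨ PySem.Int.band n x ≠ x := by
  unfold pvMaximal
  rw [mem_foldl_add_if]
  simp only [PySem.Set.empty]
  rw [coverAll_iff]
  simp

lemma memB_moves (S : PySem.Set Int) (x : Int) :
    x ∈ S.filter (fun m => !(S.any (fun n => !(m == n) && (PySem.Int.band n m == m))))
      ↔ x ∈ S ∧ ∀ n ∈ S, n = x ∨ PySem.Int.band n x ≠ x := by
  rw [List.mem_filter]
  refine and_congr Iff.rfl ?_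
  rw [Bool.not_eq_true', List.any_eq_false]
  constructor
  · intro h n hn
    have h' := h n hn
    simp only [Bool.and_eq_true, not_and, Bool.not_eq_true', beq_eq_false_iff_ne,
      beq_iff_eq, ne_eq] at h'
    by_cases hxn : n = x
    · exact Or.inl hxn
    · exact Or.inr (h' (fun he => hxn he.symm))
  · intro h n hn
    simp only [Bool.and_eq_true, not_and, Bool.not_eq_true', beq_eq_false_iff_ne,
      beq_iff_eq, ne_eq]
    intro hne
    rcases h n hn with h' | h'
    · exact absurd h'.symm hne
    · exact h'

-- ---------- assembling the bridge ----------
theorem key_bridge (countA countB : Nat) (movesA movesB : List Int)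
    (hAB : countA = countB)
    (hmem : ∀ x, x ∈ movesA ↔ x ∈ movesB)
    (hmA : ∀ m ∈ movesA, 0 ≤ m ∧ m < (2:Int)^countA) :
    (PySem.List.pyGet? (pvDpLoop movesA (1 <<< countA)) (-1)).getD 0
      = bBfsGo movesB (((1:Int) <<< countB) - 1) 0 20
          (PySem.Set.ofList [0]) (PySem.Set.ofList [0]) := by
  subst hAB
  have hmB : ∀ m ∈ movesB, 0 ≤ m ∧ m < (2:Int)^countA :=
    fun m hm => hmA m ((hmem m).mpr hm)
  rw [pv_dp_result movesA hmA, pv_bfs_result movesB hmB, Dd_congr hmem]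

-- ===== VERDICT (by name: the statement is the Claim_ definition above) =====
theorem solve_spec : Claim_equal_solve := by
  intro grid odd _ _
  show solve grid odd = solve_alt grid odd
  unfold solve solve_alt
  obtain ⟨hcount, hval⟩ := build_char grid odd
  have hS : ∀ x, x ∈ pvMovesSet (pvBuild grid odd).1 ↔ x ∈ bMasks (bCenters grid odd) := by
    intro x
    rw [mem_movesSetA, mem_masksB]
    constructor
    · rintro ⟨i, hi, j, hj, hv, hnz⟩
      exact ⟨i, hi, j, hj, by rw [← hval i j hi.1 hi.2 hj.1 hj.2]; exact hv, hnz⟩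
    · rintro ⟨i, hi, j, hj, hv, hnz⟩
      exact ⟨i, hi, j, hj, by rw [hval i j hi.1 hi.2 hj.1 hj.2]; exact hv, hnz⟩
  have hmoves : ∀ x, x ∈ pvMaximal (pvMovesSet (pvBuild grid odd).1)
      ↔ x ∈ (bMasks (bCenters grid odd)).filter
          (fun m => !((bMasks (bCenters grid odd)).any
            (fun n => !(m == n) && (PySem.Int.band n m == m)))) := by
    intro x
    rw [mem_maximalA, memB_moves]
    constructor
    · rintro ⟨h1, h2⟩
      exact ⟨(hS x).mp h1, fun n hn => h2 n ((hS n).mpr hn)⟩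
    · rintro ⟨h1, h2⟩
      exact ⟨(hS x).mpr h1, fun n hn => h2 n ((hS n).mp hn)⟩
  have hmA : ∀ m ∈ pvMaximal (pvMovesSet (pvBuild grid odd).1),
      0 ≤ m ∧ m < (2:Int)^(pvBuild grid odd).2 := by
    intro m hm
    have hmS := (mem_maximalA _ m).mp hm
    obtain ⟨i, hi, j, hj, hv, hnz⟩ := (mem_movesSetA _ m).mp hmS.1
    rw [← hv, hval i j hi.1 hi.2 hj.1 hj.2, hcount]
    exact bMask_bound _ i j
  exact key_bridge (pvBuild grid odd).2 (bCenters grid odd).length _ _ hcount hmoves hmA
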